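-- pv_equiv track=rewrite | github.com/eliottcassidy2000/math | 04-computation/palindrome_es_test.py | compute_es
-- ===== SOURCE A (Python) =====
-- from itertools import permutations
--
-- def E_paths(T, verts, a):
--     verts = list(verts)
--     if len(verts) == 1:
--         return 1 if verts[0] == a else 0
--     count = 0
--     for p in permutations(verts):
--         if p[-1] != a: continue
--         if all(T.get((p[k], p[k+1]), 0) == 1 for k in range(len(p)-1)):
--             count += 1
--     return count
--
-- def B_paths(T, verts, b):
--     verts = list(verts)
--     if len(verts) == 1:
--         return 1 if verts[0] == b else 0
--     count = 0
--     for p in permutations(verts):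
--         if p[0] != b: continue
--         if all(T.get((p[k], p[k+1]), 0) == 1 for k in range(len(p)-1)):
--             count += 1
--     return count
--
-- def compute_es(T, n, a, b):
--     U = [v for v in range(n) if v != a and v != b]
--     e_s = [0] * (len(U) + 1)
--     for mask in range(1 << len(U)):
--         S_list = [U[k] for k in range(len(U)) if mask & (1 << k)]
--         R = [U[k] for k in range(len(U)) if not (mask & (1 << k))]
--         s = len(S_list)
--         S_set = sorted(set(S_list) | {a})
--         R_set = sorted(set(R) | {b})
--         ea = E_paths(T, S_set, a)
--         bb = B_paths(T, R_set, b)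
--         e_s[s] += ea * bb
--     return e_s
-- ===== SOURCE B (Python) =====
-- # Held-Karp style memoized DP: count Hamiltonian orderings per subset/endpoint
-- # instead of enumerating all permutations per subset (asymptotically faster).
-- def compute_es(T, n, a, b):
--     U = [v for v in range(n) if v != a and v != b]
--     m = len(U)
--     memo = {}
--
--     def count_paths(S, v, fwd):
--         # number of orderings of the vertices S + (v,) that end at v (fwd=True,
--         # edges taken from T[(u,w)]) or start at v (fwd=False, edges T[(w,u)]).
--         if not S:
--             return 1
--         key = (S, v, fwd)
--         if key not in memo:
--             memo[key] = sum(count_paths(tuple(w for w in S if w != u), u, fwd)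
--                             for u in S
--                             if T.get((u, v) if fwd else (v, u), 0) == 1)
--         return memo[key]
--
--     e_s = [0] * (m + 1)
--     for mask in range(1 << m):
--         S = tuple(U[k] for k in range(m) if mask & (1 << k))
--         R = tuple(U[k] for k in range(m) if not (mask & (1 << k)))
--         e_s[len(S)] += count_paths(S, a, True) * count_paths(R, b, False)
--     return e_s
-- ===== Notes on version B (the rewrite author's own statement) =====
-- stated objective: faster
-- what changed: Replaces the per-subset brute-force enumeration of all permutations (E_paths/B_paths) by a single memoized Held-Karp-style recursion counting Hamiltonian orderings per (subset, endpoint), aggregated over the same subset loop.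
import Mathlib
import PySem

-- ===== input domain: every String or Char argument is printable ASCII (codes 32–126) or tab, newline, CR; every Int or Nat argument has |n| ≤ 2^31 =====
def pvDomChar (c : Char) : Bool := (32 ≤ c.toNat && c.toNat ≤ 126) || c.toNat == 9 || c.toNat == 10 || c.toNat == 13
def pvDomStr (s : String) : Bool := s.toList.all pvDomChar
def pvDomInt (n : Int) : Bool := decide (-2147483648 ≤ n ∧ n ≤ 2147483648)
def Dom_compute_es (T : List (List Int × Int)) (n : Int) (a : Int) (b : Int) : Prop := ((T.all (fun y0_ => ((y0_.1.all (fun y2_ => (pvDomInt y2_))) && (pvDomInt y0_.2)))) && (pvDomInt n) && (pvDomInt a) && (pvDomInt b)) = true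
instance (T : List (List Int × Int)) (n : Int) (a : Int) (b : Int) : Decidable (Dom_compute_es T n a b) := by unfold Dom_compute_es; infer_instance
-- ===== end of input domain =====

-- ===== PORT A =====
-- B changes the per-subset permutation enumeration into a memoized endpoint DP; the ports agree on every input (proved below).
def pvEdgeOK (T : List (List Int × Int)) (p : List Int) : Bool :=
  (PySem.List.pyRange 0 ((p.length : Int) - 1) 1).all (fun k =>
    PySem.Dict.getD ⟨T⟩ [(PySem.List.pyGet? p k).getD 0, (PySem.List.pyGet? p (k + 1)).getD 0] 0 == 1)

def E_paths (T : List (List Int × Int)) (verts : List Int) (a : Int) : Int :=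
  if verts.length = 1 then (if (PySem.List.pyGet? verts 0).getD 0 == a then 1 else 0)
  else
    (PySem.List.permutations verts verts.length).foldl
      (fun count p =>
        if (PySem.List.pyGet? p (-1)).getD 0 != a then count
        else if pvEdgeOK T p then count + 1 else count) 0

def B_paths (T : List (List Int × Int)) (verts : List Int) (b : Int) : Int :=
  if verts.length = 1 then (if (PySem.List.pyGet? verts 0).getD 0 == b then 1 else 0)
  else
    (PySem.List.permutations verts verts.length).foldl
      (fun count p =>
        if (PySem.List.pyGet? p 0).getD 0 != b then count
        else if pvEdgeOK T p then count + 1 else count) 0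

def compute_es (T : List (List Int × Int)) (n : Int) (a : Int) (b : Int) : List Int :=
  let U := (PySem.List.pyRange 0 n 1).filter (fun v => v != a && v != b)
  (List.range (2 ^ U.length)).foldl
    (fun e_s mask =>
      let S_list := ((List.range U.length).filter (fun k => mask.testBit k)).map
        (fun (k : Nat) => (PySem.List.pyGet? U (k : Int)).getD 0)
      let R := ((List.range U.length).filter (fun k => !mask.testBit k)).map
        (fun (k : Nat) => (PySem.List.pyGet? U (k : Int)).getD 0)
      let s := S_list.length
      let S_set := PySem.List.sorted (PySem.Set.union (PySem.Set.ofList S_list) [a]) (fun x => x) false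
      let R_set := PySem.List.sorted (PySem.Set.union (PySem.Set.ofList R) [b]) (fun x => x) false
      let ea := E_paths T S_set a
      let bb := B_paths T R_set b
      e_s.set s (e_s.getD s 0 + ea * bb))
    (List.replicate (U.length + 1) 0)

-- ===== PORT B =====
-- count_paths from Source B: memoized recursion; the memo cache is dropped (it only avoids recomputation).
def pvCountPaths (T : List (List Int × Int)) (fwd : Bool) (S : List Int) (v : Int) : Int :=
  if S = [] then 1
  else
    ((S.filter (fun u => PySem.Dict.getD ⟨T⟩ (if fwd then [u, v] else [v, u]) 0 == 1)).attach.map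
      (fun u => pvCountPaths T fwd (S.filter (fun w => w != u.1)) u.1)).sum
termination_by S.length
decreasing_by
  have hu : u.1 ∈ S := (List.mem_filter.mp u.2).1
  simp only [List.unattach_filter, List.unattach_attach,
    List.length_filter_lt_length_iff_exists, bne_iff_ne, ne_eq, Decidable.not_not,
    exists_eq_right]
  exact hu

def compute_es_alt (T : List (List Int × Int)) (n : Int) (a : Int) (b : Int) : List Int :=
  let U := (PySem.List.pyRange 0 n 1).filter (fun v => v != a && v != b)
  let m := U.length
  (List.range (2 ^ m)).foldl
    (fun e_s mask =>
      let S := ((List.range m).filter (fun k => mask.testBit k)).map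
        (fun (k : Nat) => (PySem.List.pyGet? U (k : Int)).getD 0)
      let R := ((List.range m).filter (fun k => !mask.testBit k)).map
        (fun (k : Nat) => (PySem.List.pyGet? U (k : Int)).getD 0)
      e_s.set S.length (e_s.getD S.length 0 + pvCountPaths T true S a * pvCountPaths T false R b))
    (List.replicate (m + 1) 0)

-- ===== PRECONDITION & SPEC =====
def Spec_compute_es (T : List (List Int × Int)) (n : Int) (a : Int) (b : Int) (out : List Int) : Prop := out = compute_es_alt T n a b
instance (T : List (List Int × Int)) (n : Int) (a : Int) (b : Int) (out : List Int) : Decidable (Spec_compute_es T n a b out) := by unfold Spec_compute_es; infer_instance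

-- ===== CLAIM (what is proved, stated in full; the proofs are below) =====
def Claim_equal_compute_es : Prop := ∀ (T : List (List Int × Int)) (n : Int) (a : Int) (b : Int), Dom_compute_es T n a b → Spec_compute_es T n a b (compute_es T n a b)

-- ===== LEMMAS AND PROOFS =====


-- ---------- proof-side helpers ----------

-- the edge test of A's inner loops, as a Bool on a pair
def pvE (T : List (List Int × Int)) (u v : Int) : Bool := PySem.Dict.getD ⟨T⟩ [u, v] 0 == 1

-- A's edge check, as a structural recursion
def pvChainB (T : List (List Int × Int)) : List Int → Bool
  | [] => true
  | [_] => true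
  | u :: v :: r => pvE T u v && pvChainB T (v :: r)

-- abstract form of B's DP recursion, over an arbitrary edge test
def pvDP (e : Int → Int → Bool) (S : List Int) (v : Int) : Int :=
  if S = [] then 1
  else
    ((S.filter (fun u => e v u)).attach.map
      (fun u => pvDP e (S.filter (fun w => w != u.1)) u.1)).sum
termination_by S.length
decreasing_by
  have hu : u.1 ∈ S := (List.mem_filter.mp u.2).1
  simp only [List.unattach_filter, List.unattach_attach,
    List.length_filter_lt_length_iff_exists, bne_iff_ne, ne_eq, Decidable.not_not,
    exists_eq_right]
  exact hu

-- attach elimination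
theorem pv_map_attach {α β : Type} (l : List α) (f : α → β) :
    l.attach.map (fun u => f u.1) = l.map f := by
  rw [show (fun (u : {x // x ∈ l}) => f u.1) = f ∘ Subtype.val from rfl,
    ← List.map_map, List.attach_map_subtype_val]

theorem pv_all_congr {α : Type} (l : List α) (f g : α → Bool)
    (h : ∀ x ∈ l, f x = g x) : l.all f = l.all g := by
  induction l with
  | nil => rfl
  | cons x xs ih =>
    simp only [List.all_cons, h x List.mem_cons_self]
    rw [ih (fun y hy => h y (List.mem_cons_of_mem _ hy))]

theorem pvDP_eq (e : Int → Int → Bool) (S : List Int) (v : Int) :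
    pvDP e S v = if S = [] then 1
      else ((S.filter (fun u => e v u)).map (fun u => pvDP e (S.filter (fun w => w != u)) u)).sum := by
  rw [pvDP, pv_map_attach _ (fun u => pvDP e (S.filter (fun w => w != u)) u)]

theorem pvCountPaths_eq (T : List (List Int × Int)) (fwd : Bool) (S : List Int) (v : Int) :
    pvCountPaths T fwd S v = if S = [] then 1
      else ((S.filter (fun u => PySem.Dict.getD ⟨T⟩ (if fwd then [u, v] else [v, u]) 0 == 1)).map
        (fun u => pvCountPaths T fwd (S.filter (fun w => w != u)) u)).sum := by
  rw [pvCountPaths, pv_map_attach _ (fun u => pvCountPaths T fwd (S.filter (fun w => w != u)) u)]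

theorem pvCountPaths_eq_dp (T : List (List Int × Int)) (fwd : Bool) :
    ∀ (N : Nat) (S : List Int), S.length ≤ N → ∀ (v : Int),
    pvCountPaths T fwd S v =
      pvDP (fun x y => PySem.Dict.getD ⟨T⟩ (if fwd then [y, x] else [x, y]) 0 == 1) S v := by
  intro N
  induction N with
  | zero =>
    intro S hS v
    have : S = [] := by cases S <;> simp_all
    subst this
    rw [pvCountPaths_eq, pvDP_eq]
    simp
  | succ N ih =>
    intro S hS v
    rw [pvCountPaths_eq, pvDP_eq]
    by_cases hnil : S = []
    · simp [hnil]
    · simp only [if_neg hnil]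
      apply congrArg
      apply List.map_congr_left
      intro u hu
      have huS : u ∈ S := (List.mem_filter.mp hu).1
      have hlen : (S.filter (fun w => w != u)).length ≤ N := by
        have : (S.filter (fun w => w != u)).length < S.length :=
          List.length_filter_lt_length_iff_exists.mpr ⟨u, huS, by simp⟩
        omega
      exact ih _ hlen u

-- ---------- chain bridge ----------

theorem pvEdgeOK_range (T : List (List Int × Int)) (p : List Int) :
    pvEdgeOK T p = (List.range (p.length - 1)).all
      (fun k => pvE T (p.getD k 0) (p.getD (k + 1) 0)) := by
  rw [pvEdgeOK, PySem.List.pyRange_one, List.all_map]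
  have hl : ((p.length : Int) - 1 - 0).toNat = p.length - 1 := by omega
  rw [hl]
  apply pv_all_congr
  intro k hk
  simp only [Function.comp_apply]
  rw [show (0 : Int) + (k : Int) = ((k : Nat) : Int) by omega]
  rw [show ((k : Nat) : Int) + 1 = (((k + 1 : Nat)) : Int) by push_cast; ring]
  simp only [PySem.List.pyGet?_natCast, pvE]
  rw [List.getD_eq_getElem?_getD, List.getD_eq_getElem?_getD]

theorem pv_all_range_chain (T : List (List Int × Int)) (p : List Int) :
    (List.range (p.length - 1)).all
      (fun k => pvE T (p.getD k 0) (p.getD (k + 1) 0)) = pvChainB T p := by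
  induction p using pvChainB.induct with
  | case1 => simp [pvChainB]
  | case2 x => simp [pvChainB]
  | case3 u v r ih =>
    rw [pvChainB]
    have hlen : (u :: v :: r).length - 1 = ((v :: r).length - 1) + 1 := by simp
    rw [hlen, List.range_succ_eq_map]
    simp only [List.all_cons, List.all_map]
    rw [← ih]
    rfl

theorem pvEdgeOK_eq_chainB (T : List (List Int × Int)) (p : List Int) :
    pvEdgeOK T p = pvChainB T p := by
  rw [pvEdgeOK_range, pv_all_range_chain]

theorem pvChainB_eq_decide (T : List (List Int × Int)) (p : List Int) :
    pvChainB T p = decide (List.IsChain (fun x y => pvE T x y = true) p) := by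
  induction p using pvChainB.induct with
  | case1 => simp [pvChainB]
  | case2 x => simp [pvChainB]
  | case3 u v r ih => simp [pvChainB, List.isChain_cons_cons, ih]

-- ---------- permutations machinery ----------

theorem pv_perms_succ (xs : List Int) (r : Nat) :
    PySem.List.permutations xs (r + 1) =
      (List.range xs.length).flatMap
        (fun i => (PySem.List.permutations (xs.eraseIdx i) r).map (xs.getD i 0 :: ·)) := by
  conv_lhs => rw [PySem.List.permutations]
  simp only [List.flatMap_def]
  apply congrArg List.flatten
  apply List.map_congr_left
  intro i hi
  have hk : i < xs.length := List.mem_range.mp hi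
  rw [List.getElem?_eq_getElem hk]
  simp [List.getD_eq_getElem?_getD, List.getElem?_eq_getElem hk]

theorem pv_perm_cons_eraseIdx (xs : List Int) (i : Nat) (hi : i < xs.length) :
    xs.Perm (xs.getD i 0 :: xs.eraseIdx i) := by
  conv_lhs => rw [← List.take_append_drop i xs]
  rw [← List.getElem_cons_drop hi, List.eraseIdx_eq_take_drop_succ,
    List.getD_eq_getElem?_getD, List.getElem?_eq_getElem hi]
  exact List.perm_middle

theorem pv_erase_eq_eraseIdx_idxOf (l : List Int) (u : Int) :
    ∀ (_ : u ∈ l), l.erase u = l.eraseIdx (l.idxOf u) := by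
  induction l with
  | nil => intro hu; simp at hu
  | cons x xs ih =>
    intro hu
    by_cases hx : x = u
    · subst hx
      simp [List.erase_cons_head, List.idxOf_cons_self]
    · have hne : (x == u) = false := by simp [hx]
      rw [List.erase_cons, if_neg (by simp [hx]), List.idxOf_cons, hne]
      simp only [cond_false]
      have hu' : u ∈ xs := by
        rcases List.mem_cons.mp hu with h | h
        · exact absurd h.symm hx
        · exact h
      rw [ih hu']
      rfl

theorem pv_mem_perms : ∀ (N : Nat) (xs : List Int), xs.length ≤ N → ∀ (q : List Int),
    (q ∈ PySem.List.permutations xs xs.length ↔ q.Perm xs) := by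
  intro N
  induction N with
  | zero =>
    intro xs hxs q
    have hnil : xs = [] := by cases xs <;> simp_all
    subst hnil
    simp [PySem.List.permutations]
  | succ N ih =>
    intro xs hxs q
    by_cases hnil : xs = []
    · subst hnil; simp [PySem.List.permutations]
    · obtain ⟨r, hr⟩ : ∃ r, xs.length = r + 1 := by
        cases h : xs.length with
        | zero => exact absurd (List.length_eq_zero_iff.mp h) hnil
        | succ r => exact ⟨r, rfl⟩
      rw [hr, pv_perms_succ]
      constructor
      · intro hmem
        obtain ⟨i, hi, hq⟩ := List.mem_flatMap.mp hmem
        have hik : i < xs.length := List.mem_range.mp hi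
        obtain ⟨t, ht, rfl⟩ := List.mem_map.mp hq
        have hlen : (xs.eraseIdx i).length = r := by
          rw [List.length_eraseIdx, if_pos hik]; omega
        have ht' : t.Perm (xs.eraseIdx i) := by
          have h2 := ih (xs.eraseIdx i) (by omega) t
          rw [hlen] at h2
          exact h2.mp ht
        exact (ht'.cons _).trans (pv_perm_cons_eraseIdx xs i hik).symm
      · intro hperm
        have hq : q ≠ [] := by
          intro h; subst h
          exact hnil (hperm.symm.eq_nil)
        obtain ⟨u, t, rfl⟩ : ∃ u t, q = u :: t := by
          cases q with
          | nil => exact absurd rfl hq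
          | cons u t => exact ⟨u, t, rfl⟩
        have hu : u ∈ xs := hperm.mem_iff.mp (List.mem_cons_self)
        have hidx : xs.idxOf u < xs.length := List.idxOf_lt_length_of_mem hu
        have hgd : xs.getD (xs.idxOf u) 0 = u := by
          rw [List.getD_eq_getElem?_getD, List.getElem?_eq_getElem hidx]
          simp [List.getElem_idxOf]
        have ht : t.Perm (xs.erase u) := (List.cons_perm_iff_perm_erase.mp hperm).2
        have herase : xs.erase u = xs.eraseIdx (xs.idxOf u) :=
          pv_erase_eq_eraseIdx_idxOf xs u hu
        apply List.mem_flatMap.mpr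
        refine ⟨xs.idxOf u, List.mem_range.mpr hidx, ?_⟩
        apply List.mem_map.mpr
        refine ⟨t, ?_, by rw [hgd]⟩
        have hlen : (xs.eraseIdx (xs.idxOf u)).length = r := by
          rw [List.length_eraseIdx, if_pos hidx]; omega
        have := ih (xs.eraseIdx (xs.idxOf u)) (by omega) t
        rw [hlen] at this
        exact this.mpr (herase ▸ ht)

theorem pv_nodup_perms : ∀ (N : Nat) (xs : List Int), xs.length ≤ N → xs.Nodup →
    (PySem.List.permutations xs xs.length).Nodup := by
  intro N
  induction N with
  | zero =>
    intro xs hxs _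
    have hnil : xs = [] := by cases xs <;> simp_all
    subst hnil
    simp [PySem.List.permutations]
  | succ N ih =>
    intro xs hxs hnd
    by_cases hnil : xs = []
    · subst hnil; simp [PySem.List.permutations]
    · obtain ⟨r, hr⟩ : ∃ r, xs.length = r + 1 := by
        cases h : xs.length with
        | zero => exact absurd (List.length_eq_zero_iff.mp h) hnil
        | succ r => exact ⟨r, rfl⟩
      rw [hr, pv_perms_succ]
      apply List.nodup_flatMap.mpr
      constructor
      · intro i hi
        have hik : i < xs.length := List.mem_range.mp hi
        have hlen : (xs.eraseIdx i).length = r := by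
          rw [List.length_eraseIdx, if_pos hik]; omega
        apply List.Nodup.map List.cons_injective
        have := ih (xs.eraseIdx i) (by omega) (List.Nodup.eraseIdx i hnd)
        rw [hlen] at this
        exact this
      · apply List.pairwise_iff_getElem.mpr
        intro k l hk hl hkl
        simp only [List.getElem_range]
        intro q hq1 hq2
        simp only [List.getElem_range, List.mem_map] at hq1 hq2
        obtain ⟨t1, _, rfl⟩ := hq1
        obtain ⟨t2, _, he⟩ := hq2
        have hkx : k < xs.length := by simpa using hk
        have hlx : l < xs.length := by simpa using hl
        have h1 : xs.getD l 0 = xs.getD k 0 := by injection he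
        simp only [List.getD_eq_getElem?_getD] at h1
        rw [List.getElem?_eq_getElem hkx, List.getElem?_eq_getElem hlx] at h1
        simp only [Option.getD_some] at h1
        exact absurd ((List.Nodup.getElem_inj_iff hnd).mp h1.symm) (by omega)

theorem pv_countP_perms_congr (S S' : List Int) (h : S.Perm S') (hN : S.Nodup)
    (P : List Int → Bool) :
    (PySem.List.permutations S S.length).countP P
      = (PySem.List.permutations S' S'.length).countP P := by
  have hN' : S'.Nodup := (h.nodup_iff).mp hN
  have hperm : (PySem.List.permutations S S.length).Perm
      (PySem.List.permutations S' S'.length) := by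
    apply (List.perm_ext_iff_of_nodup (pv_nodup_perms S.length S le_rfl hN)
      (pv_nodup_perms S'.length S' le_rfl hN')).mpr
    intro q
    rw [pv_mem_perms S.length S le_rfl q, pv_mem_perms S'.length S' le_rfl q]
    exact ⟨fun hq => hq.trans h, fun hq => hq.trans h.symm⟩
  exact hperm.countP_eq P

theorem pv_countP_perms_reverse (xs : List Int) (h : xs.Nodup) (P : List Int → Bool) :
    (PySem.List.permutations xs xs.length).countP P
      = (PySem.List.permutations xs xs.length).countP (fun p => P p.reverse) := by
  have hperm : ((PySem.List.permutations xs xs.length).map List.reverse).Perm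
      (PySem.List.permutations xs xs.length) := by
    apply (List.perm_ext_iff_of_nodup
      (List.Nodup.map List.reverse_injective (pv_nodup_perms xs.length xs le_rfl h))
      (pv_nodup_perms xs.length xs le_rfl h)).mpr
    intro q
    simp only [List.mem_map]
    constructor
    · rintro ⟨p, hp, rfl⟩
      rw [pv_mem_perms xs.length xs le_rfl] at hp ⊢
      exact (List.reverse_perm p).trans hp
    · intro hq
      refine ⟨q.reverse, ?_, by simp⟩
      rw [pv_mem_perms xs.length xs le_rfl] at hq ⊢
      exact (List.reverse_perm q).trans hq
  calc (PySem.List.permutations xs xs.length).countP P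
      = ((PySem.List.permutations xs xs.length).map List.reverse).countP P :=
        (hperm.countP_eq P).symm
    _ = (PySem.List.permutations xs xs.length).countP (fun p => P p.reverse) := by
        rw [List.countP_map]; rfl

-- ---------- small sum helpers ----------

theorem pv_sum_map_single {α M : Type} [AddCommMonoid M] :
    ∀ (l : List α) (_hl : l.Nodup) (u : α) (_hu : u ∈ l) (f : α → M)
      (_h0 : ∀ w ∈ l, w ≠ u → f w = 0), (l.map f).sum = f u := by
  intro l
  induction l with
  | nil => intro _ u hu; simp at hu
  | cons x xs ih =>
    intro hl u hu f h0
    simp only [List.map_cons, List.sum_cons]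
    rcases List.mem_cons.mp hu with rfl | hu'
    · have : ∀ y ∈ xs.map f, y = 0 := by
        intro y hy
        obtain ⟨w, hw, rfl⟩ := List.mem_map.mp hy
        exact h0 w (List.mem_cons_of_mem _ hw) (fun hwu => (List.nodup_cons.mp hl).1 (hwu ▸ hw))
      rw [List.sum_eq_zero this, add_zero]
    · have hxu : x ≠ u := fun hxe => (List.nodup_cons.mp hl).1 (hxe ▸ hu')
      rw [h0 x List.mem_cons_self hxu, zero_add]
      exact ih (List.nodup_cons.mp hl).2 u hu' f
        (fun w hw => h0 w (List.mem_cons_of_mem _ hw))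

theorem pv_sum_map_ite {α M : Type} [AddCommMonoid M] (l : List α) (p : α → Bool)
    (f : α → M) :
    (l.map (fun u => if p u then f u else 0)).sum = ((l.filter p).map f).sum := by
  induction l with
  | nil => simp
  | cons x xs ih =>
    by_cases hx : p x
    · simp [List.filter_cons, hx, ih]
    · simp [List.filter_cons, hx, ih]

theorem pv_map_range_getD {β : Type} (l : List Int) (f : Int → β) :
    (List.range l.length).map (fun i => f (l.getD i 0)) = l.map f := by
  apply List.ext_getElem
  · simp
  · intro i h1 h2
    simp only [List.getElem_map, List.getElem_range]
    have hi : i < l.length := by simpa using h2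
    rw [List.getD_eq_getElem?_getD, List.getElem?_eq_getElem hi]
    rfl

theorem pv_eraseIdx_eq_filter :
    ∀ (l : List Int), l.Nodup → ∀ (i : Nat), i < l.length →
      l.eraseIdx i = l.filter (fun w => w != l.getD i 0) := by
  intro l hl i hi
  have h1 : l.erase (l.getD i 0) = l.eraseIdx (l.idxOf (l.getD i 0)) :=
    pv_erase_eq_eraseIdx_idxOf l _ (by
      rw [List.getD_eq_getElem?_getD, List.getElem?_eq_getElem hi]
      exact List.getElem_mem hi)
  have h2 : l.idxOf (l.getD i 0) = i := by
    rw [List.getD_eq_getElem?_getD, List.getElem?_eq_getElem hi]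
    exact List.Nodup.idxOf_getElem hl i hi
  rw [← List.Nodup.erase_eq_filter hl, h1, h2]

theorem pv_countP_const_and (c : Bool) (Q : List Int → Bool) (l : List (List Int)) :
    l.countP (fun q => c && Q q) = if c then l.countP Q else 0 := by
  cases c <;> simp

-- ---------- the core counting lemmas ----------

theorem pv_foldl_skipcount (A B : List Int → Bool) :
    ∀ (l : List (List Int)) (init : Int),
    l.foldl (fun c p => if A p then c else if B p then c + 1 else c) init
      = init + (l.countP (fun p => !A p && B p) : Int) := by
  intro l
  induction l with
  | nil => intro init; simp
  | cons q l ih =>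
    intro init
    simp only [List.foldl_cons, List.countP_cons, ih]
    cases hA : A q <;> cases hB : B q <;> simp [hA, hB] <;> push_cast <;> ring

theorem pv_headfix (xs : List Int) (h : xs.Nodup) (v : Int) (hv : v ∈ xs)
    (Q : List Int → Bool) :
    (PySem.List.permutations xs xs.length).countP (fun p => (p.head?.getD 0 == v) && Q p)
      = (PySem.List.permutations (xs.erase v) (xs.erase v).length).countP
          (fun q => Q (v :: q)) := by
  have hnil : xs ≠ [] := List.ne_nil_of_mem hv
  obtain ⟨r, hr⟩ : ∃ r, xs.length = r + 1 := by
    cases hx : xs.length with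
    | zero => exact absurd (List.length_eq_zero_iff.mp hx) hnil
    | succ r => exact ⟨r, rfl⟩
  set i0 := xs.idxOf v with hi0
  have hidx : i0 < xs.length := List.idxOf_lt_length_of_mem hv
  have hgd : xs.getD i0 0 = v := by
    rw [List.getD_eq_getElem?_getD, List.getElem?_eq_getElem hidx]
    simp [hi0, List.getElem_idxOf]
  have herase : xs.erase v = xs.eraseIdx i0 := pv_erase_eq_eraseIdx_idxOf xs v hv
  have hlen : (xs.eraseIdx i0).length = r := by
    rw [List.length_eraseIdx, if_pos hidx]; omega
  conv_lhs => rw [hr, pv_perms_succ, List.countP_flatMap]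
  have hstep : (List.range xs.length).map
      ((List.countP fun p => (p.head?.getD 0 == v) && Q p) ∘
        fun i => (PySem.List.permutations (xs.eraseIdx i) r).map (xs.getD i 0 :: ·))
      = (List.range xs.length).map (fun i =>
          if i = i0 then (PySem.List.permutations (xs.eraseIdx i0) r).countP
            (fun q => Q (v :: q)) else 0) := by
    apply List.map_congr_left
    intro i hi
    have hik : i < xs.length := List.mem_range.mp hi
    simp only [Function.comp_apply, List.countP_map]
    by_cases hiv : i = i0
    · subst hiv
      rw [if_pos rfl]
      apply List.countP_congr
      intro q _
      have hgdE : xs[i0]?.getD 0 = v := by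
        rw [List.getElem?_eq_getElem hidx]
        simp [hi0, List.getElem_idxOf]
      simp [Function.comp, hgdE]
    · rw [if_neg hiv]
      have hne : xs.getD i 0 ≠ v := by
        intro he
        apply hiv
        have h1 : xs.getD i 0 = xs[i] := by
          rw [List.getD_eq_getElem?_getD, List.getElem?_eq_getElem hik]; rfl
        have h2 : xs.getD i0 0 = xs[i0]'hidx := by
          rw [List.getD_eq_getElem?_getD, List.getElem?_eq_getElem hidx]; rfl
        have h3 : xs[i] = xs[i0]'hidx := by rw [← h1, ← h2, he, hgd]
        exact (List.Nodup.getElem_inj_iff h).mp h3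
      apply List.countP_eq_zero.mpr
      intro q _
      have hneE : xs[i]?.getD 0 ≠ v := by
        rw [List.getD_eq_getElem?_getD] at hne
        exact hne
      simp only [Function.comp, Bool.and_eq_true, beq_iff_eq, not_and]
      intro hE
      exact absurd hE hneE
  rw [hstep]
  rw [pv_sum_map_single (M := Nat) (List.range xs.length) List.nodup_range i0
    (List.mem_range.mpr hidx) _
    (by intro w _ hw; simp [hw])]
  rw [herase, hlen]
  simp

theorem pv_C1 (e : Int → Int → Bool) :
    ∀ (N : Nat) (S : List Int), S.length ≤ N → S.Nodup → ∀ (v : Int),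
    ((PySem.List.permutations S S.length).countP
        (fun q => decide (List.IsChain (fun x y => e x y = true) (v :: q))) : Int)
      = pvDP e S v := by
  intro N
  induction N with
  | zero =>
    intro S hS _ v
    have hnil : S = [] := by cases S <;> simp_all
    subst hnil
    rw [pvDP_eq]
    simp [PySem.List.permutations]
  | succ N ih =>
    intro S hS hnd v
    by_cases hnil : S = []
    · subst hnil
      rw [pvDP_eq]
      simp [PySem.List.permutations]
    · obtain ⟨r, hr⟩ : ∃ r, S.length = r + 1 := by
        cases hx : S.length with
        | zero => exact absurd (List.length_eq_zero_iff.mp hx) hnil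
        | succ r => exact ⟨r, rfl⟩
      conv_lhs => rw [hr, pv_perms_succ, List.countP_flatMap]
      rw [Nat.cast_list_sum, List.map_map]
      have hstep : (List.range S.length).map
          ((fun (n : Nat) => (n : Int)) ∘
            ((List.countP fun q => decide (List.IsChain (fun x y => e x y = true) (v :: q))) ∘
              fun i => (PySem.List.permutations (S.eraseIdx i) r).map (S.getD i 0 :: ·)))
          = (List.range S.length).map (fun i =>
              if e v (S.getD i 0) then
                pvDP e (S.filter (fun w => w != S.getD i 0)) (S.getD i 0) else 0) := by
        apply List.map_congr_left
        intro i hi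
        have hik : i < S.length := List.mem_range.mp hi
        have hfilter : S.eraseIdx i = S.filter (fun w => w != S.getD i 0) :=
          pv_eraseIdx_eq_filter S hnd i hik
        have hlen : (S.eraseIdx i).length = r := by
          rw [List.length_eraseIdx, if_pos hik]; omega
        simp only [Function.comp_apply, List.countP_map]
        have hcnt : (List.countP
              ((fun q => decide (List.IsChain (fun x y => e x y = true) (v :: q))) ∘
                (fun q => S.getD i 0 :: q))
              (PySem.List.permutations (S.eraseIdx i) r))
            = (List.countP
              (fun q => e v (S.getD i 0) &&
                decide (List.IsChain (fun x y => e x y = true) (S.getD i 0 :: q)))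
              (PySem.List.permutations (S.eraseIdx i) r)) := by
          apply List.countP_congr
          intro q _
          simp [Function.comp, List.isChain_cons_cons]
        rw [hcnt, pv_countP_const_and]
        have hlenf : (S.filter (fun w => w != S.getD i 0)).length ≤ N := by
          rw [← hfilter, hlen]; omega
        have hndf : (S.filter (fun w => w != S.getD i 0)).Nodup :=
          List.Nodup.filter _ hnd
        have hih := ih (S.filter (fun w => w != S.getD i 0)) hlenf hndf (S.getD i 0)
        rw [← hfilter, hlen] at hih
        rw [apply_ite (fun (n : Nat) => (n : Int)), hih, hfilter]
        simp
      have hmr := pv_map_range_getD S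
        (fun u => if e v u then pvDP e (S.filter (fun w => w != u)) u else 0)
      rw [hstep, hmr, pv_sum_map_ite, pvDP_eq, if_neg hnil]

-- ---------- per-call lemmas ----------

theorem pv_B_paths_eq (T : List (List Int × Int)) (V S : List Int) (b : Int)
    (hN : (b :: S).Nodup) (hperm : V.Perm (b :: S)) :
    B_paths T V b = pvCountPaths T false S b := by
  have hSnd : S.Nodup := (List.nodup_cons.mp hN).2
  have hVnd : V.Nodup := hperm.nodup_iff.mpr hN
  have hbV : b ∈ V := hperm.mem_iff.mpr List.mem_cons_self
  rw [B_paths]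
  by_cases h1 : V.length = 1
  · have hS : S = [] := by
      have hl := hperm.length_eq
      rw [h1] at hl
      simp only [List.length_cons] at hl
      exact List.length_eq_zero_iff.mp (by omega)
    subst hS
    have hVb : V = [b] := List.perm_singleton.mp hperm
    subst hVb
    rw [pvCountPaths_eq]
    simp [PySem.List.pyGet?_zero]
  · rw [if_neg h1, pv_foldl_skipcount, zero_add]
    have hc : (PySem.List.permutations V V.length).countP
        (fun p => !((PySem.List.pyGet? p 0).getD 0 != b) && pvEdgeOK T p)
        = (PySem.List.permutations V V.length).countP
        (fun p => (p.head?.getD 0 == b) &&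
          decide (List.IsChain (fun x y => pvE T x y = true) p)) := by
      apply List.countP_congr
      intro p _
      rw [pvEdgeOK_eq_chainB, pvChainB_eq_decide]
      simp [PySem.List.pyGet?_zero, List.head?_eq_getElem?]
    rw [hc, pv_headfix V hVnd b hbV]
    have hSperm : (V.erase b).Perm S := by
      have h2 := hperm.erase b
      simpa using h2
    rw [pv_countP_perms_congr (V.erase b) S hSperm (hVnd.erase b)]
    rw [pv_C1 (fun x y => pvE T x y) S.length S le_rfl hSnd b]
    rw [pvCountPaths_eq_dp T false S.length S le_rfl b]
    rfl

theorem pv_E_paths_eq (T : List (List Int × Int)) (V S : List Int) (a : Int)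
    (hN : (a :: S).Nodup) (hperm : V.Perm (a :: S)) :
    E_paths T V a = pvCountPaths T true S a := by
  have hSnd : S.Nodup := (List.nodup_cons.mp hN).2
  have hVnd : V.Nodup := hperm.nodup_iff.mpr hN
  have haV : a ∈ V := hperm.mem_iff.mpr List.mem_cons_self
  rw [E_paths]
  by_cases h1 : V.length = 1
  · have hS : S = [] := by
      have hl := hperm.length_eq
      rw [h1] at hl
      simp only [List.length_cons] at hl
      exact List.length_eq_zero_iff.mp (by omega)
    subst hS
    have hVa : V = [a] := List.perm_singleton.mp hperm
    subst hVa
    rw [pvCountPaths_eq]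
    simp [PySem.List.pyGet?_zero]
  · rw [if_neg h1, pv_foldl_skipcount, zero_add]
    have hc : (PySem.List.permutations V V.length).countP
        (fun p => !((PySem.List.pyGet? p (-1)).getD 0 != a) && pvEdgeOK T p)
        = (PySem.List.permutations V V.length).countP
        (fun p => (p.getLast?.getD 0 == a) &&
          decide (List.IsChain (fun x y => pvE T x y = true) p)) := by
      apply List.countP_congr
      intro p _
      rw [pvEdgeOK_eq_chainB, pvChainB_eq_decide]
      simp [PySem.List.pyGet?_neg_one]
    rw [hc, pv_countP_perms_reverse V hVnd]
    have hrev : (PySem.List.permutations V V.length).countP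
        (fun p => (p.reverse.getLast?.getD 0 == a) &&
          decide (List.IsChain (fun x y => pvE T x y = true) p.reverse))
        = (PySem.List.permutations V V.length).countP
        (fun p => (p.head?.getD 0 == a) &&
          decide (List.IsChain (fun x y => pvE T y x = true) p)) := by
      apply List.countP_congr
      intro p _
      simp [List.getLast?_reverse, List.isChain_reverse]
    rw [hrev, pv_headfix V hVnd a haV]
    have hSperm : (V.erase a).Perm S := by
      have h2 := hperm.erase a
      simpa using h2
    rw [pv_countP_perms_congr (V.erase a) S hSperm (hVnd.erase a)]
    rw [pv_C1 (fun x y => pvE T y x) S.length S le_rfl hSnd a]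
    rw [pvCountPaths_eq_dp T true S.length S le_rfl a]
    rfl

-- ---------- outer loop ----------

theorem pv_sorted_union_perm (S : List Int) (h : S.Nodup) (a : Int) (ha : a ∉ S) :
    (PySem.List.sorted (PySem.Set.union (PySem.Set.ofList S) [a]) (fun x => x) false).Perm
      (a :: S) := by
  have h2 : PySem.Set.union (PySem.Set.ofList S) [a] = S ++ [a] := by
    rw [PySem.Set.ofList_eq_self_of_nodup S h]
    simp [PySem.Set.union, PySem.Set.update, PySem.Set.add, PySem.Set.contains, ha]
  rw [h2]
  exact (PySem.List.sorted_perm _ _ _).trans (List.perm_append_singleton a S)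

theorem pv_masked_map (U : List Int) (p : Nat → Bool) :
    (((List.range U.length).filter p).map
      (fun (k : Nat) => (PySem.List.pyGet? U (k : Int)).getD 0)).Sublist U := by
  have hfun : (fun (k : Nat) => (PySem.List.pyGet? U (k : Int)).getD 0)
      = fun (k : Nat) => U.getD k 0 := by
    funext k
    simp [PySem.List.pyGet?_natCast, List.getD_eq_getElem?_getD]
  rw [hfun]
  have h3 : (List.range U.length).map (fun k => U.getD k 0) = U := by
    have h4 := pv_map_range_getD U (fun x => x)
    simpa using h4
  have h2 : (((List.range U.length).filter p).map (fun (k : Nat) => U.getD k 0)).Sublist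
      ((List.range U.length).map (fun (k : Nat) => U.getD k 0)) :=
    List.Sublist.map _ List.filter_sublist
  rw [h3] at h2
  exact h2

theorem pv_step_eq (T : List (List Int × Int)) (SL RL : List Int) (a b : Int)
    (hSL : SL.Nodup) (haS : a ∉ SL) (hRL : RL.Nodup) (hbR : b ∉ RL)
    (es : List Int) (s : Nat) :
    es.set s (es.getD s 0 +
        E_paths T (PySem.List.sorted (PySem.Set.union (PySem.Set.ofList SL) [a]) (fun x => x) false) a *
        B_paths T (PySem.List.sorted (PySem.Set.union (PySem.Set.ofList RL) [b]) (fun x => x) false) b)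
      = es.set s (es.getD s 0 + pvCountPaths T true SL a * pvCountPaths T false RL b) := by
  rw [pv_E_paths_eq T _ SL a (List.nodup_cons.mpr ⟨haS, hSL⟩) (pv_sorted_union_perm SL hSL a haS)]
  rw [pv_B_paths_eq T _ RL b (List.nodup_cons.mpr ⟨hbR, hRL⟩) (pv_sorted_union_perm RL hRL b hbR)]

-- ===== VERDICT (by name: the statement is the Claim_ definition above) =====
theorem compute_es_spec : Claim_equal_compute_es := by
  intro T n a b _
  show compute_es T n a b = compute_es_alt T n a b
  simp only [compute_es, compute_es_alt]
  apply PySem.List.foldl_congr_mem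
  intro es mask _
  have hU : ((PySem.List.pyRange 0 n 1).filter (fun v => v != a && v != b)).Nodup := by
    apply List.Nodup.filter
    rw [PySem.List.pyRange_one]
    exact List.nodup_range.map (fun x y h => by omega)
  set U := (PySem.List.pyRange 0 n 1).filter (fun v => v != a && v != b) with hUdef
  have haU : a ∉ U := by
    intro hmem
    have := (List.mem_filter.mp hmem).2
    simp at this
  have hbU : b ∉ U := by
    intro hmem
    have := (List.mem_filter.mp hmem).2
    simp at this
  have hSsub := pv_masked_map U (fun k => mask.testBit k)
  have hRsub := pv_masked_map U (fun k => !mask.testBit k)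
  exact pv_step_eq T _ _ a b (hSsub.nodup hU) (fun hm => haU (hSsub.subset hm))
    (hRsub.nodup hU) (fun hm => hbU (hRsub.subset hm)) es _
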